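-- pv_equiv track=rewrite | github.com/agritheory/test_utils | test_utils/utils/restore_partitions.py | _unescape_tsv_value
-- ===== SOURCE A (Python) =====
-- def _unescape_tsv_value(value):
-- 	r"""
-- 	Unescape a TSV value, returning None for NULL marker.
-- 	Reverses the escaping done by _escape_tsv_value.
-- 	"""
-- 	if value == "\\N":
-- 		return None
--
-- 	result = []
-- 	i = 0
-- 	while i < len(value):
-- 		if value[i] == "\\" and i + 1 < len(value):
-- 			next_char = value[i + 1]
-- 			if next_char == "\\":
-- 				result.append("\\")
-- 			elif next_char == "t":
-- 				result.append("\t")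
-- 			elif next_char == "n":
-- 				result.append("\n")
-- 			elif next_char == "r":
-- 				result.append("\r")
-- 			elif next_char == "0":
-- 				result.append("\0")
-- 			elif next_char == "N":
-- 				return None
-- 			else:
-- 				result.append(value[i])
-- 				result.append(next_char)
-- 			i += 2
-- 		else:
-- 			result.append(value[i])
-- 			i += 1
--
-- 	return "".join(result)
-- ===== SOURCE B (Python) =====
-- _ESC = {"t": "\t", "n": "\n", "r": "\r", "0": "\0"}
--
--
-- def _unescape_tsv_value(value):
-- 	r"""
-- 	Unescape a TSV value, returning None for NULL marker.
-- 	Split on backslashes: each later segment is preceded by one backslash,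
-- 	so its first character is the escaped character.
-- 	"""
-- 	parts = value.split("\\")
-- 	out = [parts[0]]
-- 	it = iter(parts[1:])
-- 	for part in it:
-- 		if part == "":
-- 			# escaped backslash: the next segment (if any) is literal
-- 			out.append("\\" + next(it, ""))
-- 		elif part[0] == "N":
-- 			return None
-- 		elif part[0] in _ESC:
-- 			out.append(_ESC[part[0]] + part[1:])
-- 		else:
-- 			out.append("\\" + part)
-- 	return "".join(out)
-- ===== Notes on version B (the rewrite author's own statement) =====
-- stated objective: simpler
-- what changed: Replaces A's manual index-stepping while loop with a split-on-backslash decomposition: each segment after the first begins with the escaped character, handled via a small table and an iterator that consumes the following segment for escaped backslashes.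
import Mathlib
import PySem

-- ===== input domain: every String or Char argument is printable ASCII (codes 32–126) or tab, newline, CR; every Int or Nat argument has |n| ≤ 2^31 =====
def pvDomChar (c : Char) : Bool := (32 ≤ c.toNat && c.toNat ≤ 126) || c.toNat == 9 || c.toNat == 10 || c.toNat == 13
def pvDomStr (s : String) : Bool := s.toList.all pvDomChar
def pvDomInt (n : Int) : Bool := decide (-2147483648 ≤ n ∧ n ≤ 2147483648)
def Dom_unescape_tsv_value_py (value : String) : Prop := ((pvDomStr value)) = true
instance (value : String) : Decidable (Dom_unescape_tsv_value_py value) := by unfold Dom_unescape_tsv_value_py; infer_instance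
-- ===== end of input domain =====

-- B replaces A's index-stepping character loop by split-on-backslash: each later
-- segment's first char is the escaped char (simpler, no manual index arithmetic).

-- ===== PORT A =====
-- A's while loop over indices, as structural recursion over the character list
-- (result built front-to-back by cons instead of append+join; same characters).
-- the two recursions are mutual so each consumes one list cell per call
-- (i += 2 = pvAGoEsc handling the char after the backslash)
mutual
def pvAGo : List Char → Option (List Char)
  | [] => some []
  | c :: rest =>
    if c = '\\' then pvAGoEsc c rest
    else (pvAGo rest).map (c :: ·)
def pvAGoEsc (c : Char) : List Char → Option (List Char)
  | [] => some [c]              -- i+1 < len fails: append value[i], i += 1, loop ends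
  | n :: rest' =>
    if n = '\\' then (pvAGo rest').map ('\\' :: ·)
    else if n = 't' then (pvAGo rest').map ('\t' :: ·)
    else if n = 'n' then (pvAGo rest').map ('\n' :: ·)
    else if n = 'r' then (pvAGo rest').map ('\r' :: ·)
    else if n = '0' then (pvAGo rest').map (Char.ofNat 0 :: ·)
    else if n = 'N' then none
    else (pvAGo rest').map (fun r => c :: n :: r)
end

def unescape_tsv_value_py (value : String) : Option String :=
  if value = "\\N" then none
  else (pvAGo value.toList).map String.ofList

-- ===== PORT B =====
-- value.split("\\") on the character list (never returns [])
def pvSplitBS : List Char → List (List Char)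
  | [] => [[]]
  | c :: l =>
    if c = '\\' then [] :: pvSplitBS l
    else
      match pvSplitBS l with
      | h :: t => (c :: h) :: t
      | [] => [[c]]                 -- unreachable

-- the escape table _ESC plus the default '\\' + part branch
def pvEsc (c : Char) (cs : List Char) : List Char :=
  if c = 't' then '\t' :: cs
  else if c = 'n' then '\n' :: cs
  else if c = 'r' then '\r' :: cs
  else if c = '0' then Char.ofNat 0 :: cs
  else '\\' :: c :: cs

-- B's for-loop over the iterator of the remaining parts
-- (the empty-part branch that calls next(it, "") is the helper pvBGoBS)
mutual
def pvBGo : List (List Char) → Option (List Char)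
  | [] => some []
  | [] :: ps => pvBGoBS ps
  | (c :: cs) :: ps =>
    if c = 'N' then none
    else (pvBGo ps).map (fun r => pvEsc c cs ++ r)
def pvBGoBS : List (List Char) → Option (List Char)
  | [] => some ['\\']            -- next(it, "") = ""
  | q :: ps' => (pvBGo ps').map (fun r => '\\' :: (q ++ r))
end

def unescape_tsv_value_py_alt (value : String) : Option String :=
  match pvSplitBS value.toList with
  | [] => some ""                  -- unreachable: pvSplitBS never returns []
  | p :: ps => (pvBGo ps).map (fun r => String.ofList (p ++ r))

-- ===== PRECONDITION & SPEC =====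
def Spec_unescape_tsv_value_py (value : String) (out : Option String) : Prop := out = unescape_tsv_value_py_alt value
instance (value : String) (out : Option String) : Decidable (Spec_unescape_tsv_value_py value out) := by unfold Spec_unescape_tsv_value_py; infer_instance

-- ===== CLAIM (what is proved, stated in full; the proofs are below) =====
def Claim_equal_unescape_tsv_value_py : Prop := ∀ (value : String), Dom_unescape_tsv_value_py value → Spec_unescape_tsv_value_py value (unescape_tsv_value_py value)

-- ===== LEMMAS AND PROOFS =====
theorem pvSplitBS_ne_nil (l : List Char) : pvSplitBS l ≠ [] := by
  cases l with
  | nil => simp [pvSplitBS]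
  | cons c l =>
    simp only [pvSplitBS]
    split
    · simp
    · cases h : pvSplitBS l <;> simp

-- the central invariant: A's scan equals B's fold over the split
theorem pvAGo_eq_bGo_aux : ∀ (fuel : Nat) (l : List Char), l.length ≤ fuel →
    pvAGo l = (match pvSplitBS l with
               | [] => some []
               | p :: ps => (pvBGo ps).map (p ++ ·)) := by
  intro fuel
  induction fuel with
  | zero =>
    intro l hl
    rw [List.length_eq_zero_iff.mp (Nat.le_zero.mp hl)]
    simp [pvAGo, pvSplitBS, pvBGo]
  | succ m ih =>
    intro l hl
    match l with
    | [] => simp [pvAGo, pvSplitBS, pvBGo]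
    | c :: rest =>
      by_cases hc : c = '\\'
      · subst hc
        rw [show pvAGo ('\\' :: rest) = pvAGoEsc '\\' rest by simp [pvAGo]]
        match rest with
        | [] => simp [pvAGoEsc, pvSplitBS, pvBGo, pvBGoBS]
        | n :: rest' =>
          have hr : rest'.length ≤ m := by simp at hl; omega
          obtain ⟨q, ps', h⟩ := List.exists_cons_of_ne_nil (pvSplitBS_ne_nil rest')
          have ihr := ih rest' hr
          rw [h] at ihr
          by_cases h1 : n = '\\'
          · subst h1
            simp [pvAGoEsc, pvSplitBS, h, pvBGo, pvBGoBS, ihr,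
              Option.map_map, Function.comp_def]
          · by_cases h2 : n = 't'
            · subst h2
              simp [pvAGoEsc, pvSplitBS, h, pvBGo, pvEsc, ihr,
                Option.map_map, Function.comp_def]
            · by_cases h3 : n = 'n'
              · subst h3
                simp [pvAGoEsc, pvSplitBS, h, pvBGo, pvEsc, ihr,
                  Option.map_map, Function.comp_def]
              · by_cases h4 : n = 'r'
                · subst h4
                  simp [pvAGoEsc, pvSplitBS, h, pvBGo, pvEsc, ihr,
                    Option.map_map, Function.comp_def]
                · by_cases h5 : n = '0'
                  · subst h5
                    simp [pvAGoEsc, pvSplitBS, h, pvBGo, pvEsc, ihr,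
                      Option.map_map, Function.comp_def]
                  · by_cases h6 : n = 'N'
                    · subst h6
                      simp [pvAGoEsc, pvSplitBS, h, h1, pvBGo]
                    · simp [pvAGoEsc, pvSplitBS, h, h1, h2, h3, h4, h5, h6,
                        pvBGo, pvEsc, ihr, Option.map_map, Function.comp_def]
      · have hr : rest.length ≤ m := by simp at hl; omega
        obtain ⟨q, ps', h⟩ := List.exists_cons_of_ne_nil (pvSplitBS_ne_nil rest)
        have ihr := ih rest hr
        rw [h] at ihr
        simp [pvAGo, pvSplitBS, h, hc, ihr, Option.map_map, Function.comp_def]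

theorem pvAGo_eq_bGo (l : List Char) :
    pvAGo l = (match pvSplitBS l with
               | [] => some []
               | p :: ps => (pvBGo ps).map (p ++ ·)) :=
  pvAGo_eq_bGo_aux l.length l (Nat.le_refl _)

-- ===== VERDICT (by name: the statement is the Claim_ definition above) =====
theorem unescape_tsv_value_py_spec : Claim_equal_unescape_tsv_value_py := by
  intro value _
  unfold Spec_unescape_tsv_value_py unescape_tsv_value_py unescape_tsv_value_py_alt
  by_cases hv : value = "\\N"
  · subst hv; decide
  · rw [if_neg hv, pvAGo_eq_bGo]
    rcases h : pvSplitBS value.toList with _ | ⟨p, ps⟩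
    · exact absurd h (pvSplitBS_ne_nil value.toList)
    · simp [Option.map_map, Function.comp_def]
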